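-- pv_equiv track=rewrite | github.com/MRL-mana/manaos-integrations | scripts/misc/lora_caption_prep.py | _pick_default_vision_model
-- ===== SOURCE A (Python) =====
-- from typing import Iterable, List, Optional, Tuple
--
-- def _pick_default_vision_model(models: List[str]) -> Optional[str]:
--     if not models:
--         return None
--     preferred = ["qwen", "vl", "llava", "vision"]
--     for key in preferred:
--         for m in models:
--             if key in m.lower():
--                 return m
--     return models[0]
-- ===== SOURCE B (Python) =====
-- def _pick_default_vision_model(models):
--     if not models:
--         return None
--     preferred = ["qwen", "vl", "llava", "vision"]
--     n = len(preferred)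
--     best_model = None
--     best_rank = n
--     for m in models:
--         rank = next((i for i, k in enumerate(preferred) if k in m.lower()), n)
--         if rank < best_rank:
--             best_rank = rank
--             best_model = m
--     return best_model if best_rank < n else models[0]
-- ===== Notes on version B (the rewrite author's own statement) =====
-- stated objective: alternative
-- what changed: Replaces the key-outer/model-inner nested scan by a single pass over the models that maintains the best (lowest) preferred-keyword rank seen so far, with a strict '<' update so the first model at each rank wins.
import Mathlib
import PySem

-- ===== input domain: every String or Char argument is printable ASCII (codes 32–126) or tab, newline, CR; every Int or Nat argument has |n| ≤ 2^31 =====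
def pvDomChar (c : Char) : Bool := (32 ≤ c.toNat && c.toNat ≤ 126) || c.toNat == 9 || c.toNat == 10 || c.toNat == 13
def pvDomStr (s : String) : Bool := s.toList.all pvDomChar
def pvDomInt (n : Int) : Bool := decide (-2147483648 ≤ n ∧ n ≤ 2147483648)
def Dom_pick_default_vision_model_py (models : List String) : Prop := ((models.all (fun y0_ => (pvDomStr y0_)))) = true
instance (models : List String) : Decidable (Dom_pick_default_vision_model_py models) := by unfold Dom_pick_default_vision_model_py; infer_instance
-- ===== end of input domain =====

-- B replaces A's key-outer/model-inner nested scan by a single pass over the models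
-- maintaining the best (lowest) preferred-keyword rank; alternative decomposition, same result.

-- ===== PORT A =====
-- inner loop: `for m in models: if key in m.lower(): return m`
def pyPickInner (key : String) (models : List String) : Option String :=
  models.find? (fun m => PySem.Str.isIn key (PySem.Str.lower m))

-- outer loop over the preferred keys, returning on the first hit
def pyPickOuter (keys : List String) (models : List String) : Option String :=
  match keys with
  | [] => none
  | k :: kt =>
    match pyPickInner k models with
    | some m => some m
    | none => pyPickOuter kt models

def pick_default_vision_model_py (models : List String) : Option String :=
  match models with
  | [] => none
  | m0 :: _ =>
    match pyPickOuter ["qwen", "vl", "llava", "vision"] models with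
    | some m => some m
    | none => some m0

-- ===== PORT B =====
-- rank of a model: index of the first preferred key contained in m.lower(), else len(preferred)
def altRank (preferred : List String) (i : Nat) (m : String) : Nat :=
  match preferred with
  | [] => i
  | k :: kt => if PySem.Str.isIn k (PySem.Str.lower m) then i else altRank kt (i + 1) m

-- one step of the single pass: keep the strictly better (lower-rank) model
def altStep (pref : List String) (st : Option String × Nat) (m : String) : Option String × Nat :=
  if altRank pref 0 m < st.2 then (some m, altRank pref 0 m) else st

def pick_default_vision_model_py_alt (models : List String) : Option String :=
  match models with
  | [] => none
  | m0 :: _ =>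
    let pref : List String := ["qwen", "vl", "llava", "vision"]
    let st := models.foldl (altStep pref) (none, pref.length)
    if st.2 < pref.length then st.1 else some m0

-- ===== PRECONDITION & SPEC =====
def Spec_pick_default_vision_model_py (models : List String) (out : Option String) : Prop := out = pick_default_vision_model_py_alt models
instance (models : List String) (out : Option String) : Decidable (Spec_pick_default_vision_model_py models out) := by unfold Spec_pick_default_vision_model_py; infer_instance

-- ===== CLAIM (what is proved, stated in full; the proofs are below) =====
def Claim_equal_pick_default_vision_model_py : Prop := ∀ (models : List String), Dom_pick_default_vision_model_py models → Spec_pick_default_vision_model_py models (pick_default_vision_model_py models)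

-- ===== LEMMAS AND PROOFS =====

-- abbreviation for `key in m.lower()`
def keyIn (key m : String) : Bool := PySem.Str.isIn key (PySem.Str.lower m)

lemma find?_congr_mem {α : Type} (p q : α → Bool) :
    ∀ l : List α, (∀ a ∈ l, p a = q a) → l.find? p = l.find? q := by
  intro l
  induction l with
  | nil => intro _; rfl
  | cons a t ih =>
    intro h
    simp only [List.find?_cons]
    rw [h a (by simp)]
    cases q a with
    | true => rfl
    | false => exact ih (fun x hx => h x (by simp [hx]))

lemma fold_stay (pref : List String) :
    ∀ (ms : List String) (b : Option String) (r : Nat),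
      (∀ m ∈ ms, r ≤ altRank pref 0 m) → ms.foldl (altStep pref) (b, r) = (b, r) := by
  intro ms
  induction ms with
  | nil => intro b r _; rfl
  | cons m t ih =>
    intro b r h
    have hm : r ≤ altRank pref 0 m := h m (by simp)
    simp only [List.foldl_cons, altStep]
    rw [if_neg (by omega)]
    exact ih b r (fun x hx => h x (by simp [hx]))

lemma fold_find (pref : List String) (j : Nat) :
    ∀ (ms : List String) (b : Option String) (r : Nat) (x : String),
      j < r → (∀ m ∈ ms, j ≤ altRank pref 0 m) →
      ms.find? (fun m => altRank pref 0 m == j) = some x →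
      ms.foldl (altStep pref) (b, r) = (some x, j) := by
  intro ms
  induction ms with
  | nil => intro b r x _ _ hf; simp at hf
  | cons m t ih =>
    intro b r x hjr hge hf
    rw [List.find?_cons] at hf
    by_cases hm : altRank pref 0 m = j
    · rw [hm] at hf
      simp only [BEq.rfl] at hf
      have hx : x = m := by simpa using hf.symm
      rw [hx]
      simp only [List.foldl_cons, altStep]
      rw [if_pos (by omega)]
      rw [hm]
      exact fold_stay pref t (some m) j (fun y hy => hge y (by simp [hy]))
    · have hne : (altRank pref 0 m == j) = false := by simp [hm]
      rw [hne] at hf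
      simp only [] at hf
      have hgt : j < altRank pref 0 m := by
        have := hge m (by simp); omega
      simp only [List.foldl_cons, altStep]
      by_cases hlt : altRank pref 0 m < r
      · rw [if_pos hlt]
        exact ih (some m) _ x hgt (fun y hy => hge y (by simp [hy])) hf
      · rw [if_neg hlt]
        exact ih b r x hjr (fun y hy => hge y (by simp [hy])) hf

-- rank characterizations on the literal preferred list
lemma rank_unfold (m : String) :
    altRank ["qwen", "vl", "llava", "vision"] 0 m =
      if keyIn "qwen" m then 0 else if keyIn "vl" m then 1
      else if keyIn "llava" m then 2 else if keyIn "vision" m then 3 else 4 := by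
  simp [altRank, keyIn]

lemma rank_eq0 (m : String) :
    (altRank ["qwen", "vl", "llava", "vision"] 0 m == 0) = keyIn "qwen" m := by
  rw [rank_unfold]; cases hq : keyIn "qwen" m <;> cases hv : keyIn "vl" m <;> cases hl : keyIn "llava" m <;> cases hvs : keyIn "vision" m <;> simp_all

lemma rank_eq1 (m : String) (h0 : keyIn "qwen" m = false) :
    (altRank ["qwen", "vl", "llava", "vision"] 0 m == 1) = keyIn "vl" m := by
  rw [rank_unfold]; cases hq : keyIn "qwen" m <;> cases hv : keyIn "vl" m <;> cases hl : keyIn "llava" m <;> cases hvs : keyIn "vision" m <;> simp_all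

lemma rank_eq2 (m : String) (h0 : keyIn "qwen" m = false) (h1 : keyIn "vl" m = false) :
    (altRank ["qwen", "vl", "llava", "vision"] 0 m == 2) = keyIn "llava" m := by
  rw [rank_unfold]; cases hq : keyIn "qwen" m <;> cases hv : keyIn "vl" m <;> cases hl : keyIn "llava" m <;> cases hvs : keyIn "vision" m <;> simp_all

lemma rank_eq3 (m : String) (h0 : keyIn "qwen" m = false) (h1 : keyIn "vl" m = false)
    (h2 : keyIn "llava" m = false) :
    (altRank ["qwen", "vl", "llava", "vision"] 0 m == 3) = keyIn "vision" m := by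
  rw [rank_unfold]; cases hq : keyIn "qwen" m <;> cases hv : keyIn "vl" m <;> cases hl : keyIn "llava" m <;> cases hvs : keyIn "vision" m <;> simp_all

lemma rank_ge1 (m : String) (h0 : keyIn "qwen" m = false) :
    1 ≤ altRank ["qwen", "vl", "llava", "vision"] 0 m := by
  rw [rank_unfold]; cases hq : keyIn "qwen" m <;> cases hv : keyIn "vl" m <;> cases hl : keyIn "llava" m <;> cases hvs : keyIn "vision" m <;> simp_all

lemma rank_ge2 (m : String) (h0 : keyIn "qwen" m = false) (h1 : keyIn "vl" m = false) :
    2 ≤ altRank ["qwen", "vl", "llava", "vision"] 0 m := by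
  rw [rank_unfold]; cases hq : keyIn "qwen" m <;> cases hv : keyIn "vl" m <;> cases hl : keyIn "llava" m <;> cases hvs : keyIn "vision" m <;> simp_all

lemma rank_ge3 (m : String) (h0 : keyIn "qwen" m = false) (h1 : keyIn "vl" m = false)
    (h2 : keyIn "llava" m = false) :
    3 ≤ altRank ["qwen", "vl", "llava", "vision"] 0 m := by
  rw [rank_unfold]; cases hq : keyIn "qwen" m <;> cases hv : keyIn "vl" m <;> cases hl : keyIn "llava" m <;> cases hvs : keyIn "vision" m <;> simp_all

lemma rank_eq4 (m : String) (h0 : keyIn "qwen" m = false) (h1 : keyIn "vl" m = false)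
    (h2 : keyIn "llava" m = false) (h3 : keyIn "vision" m = false) :
    4 ≤ altRank ["qwen", "vl", "llava", "vision"] 0 m := by
  rw [rank_unfold]; cases hq : keyIn "qwen" m <;> cases hv : keyIn "vl" m <;> cases hl : keyIn "llava" m <;> cases hvs : keyIn "vision" m <;> simp_all

-- ===== VERDICT (by name: the statement is the Claim_ definition above) =====
theorem pick_default_vision_model_py_spec : Claim_equal_pick_default_vision_model_py := by
  intro models _
  unfold Spec_pick_default_vision_model_py
  unfold pick_default_vision_model_py pick_default_vision_model_py_alt
  cases models with
  | nil => rfl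
  | cons m0 t =>
    simp only []
    set ms : List String := m0 :: t with hms
    have hfind : ∀ (k : String), pyPickInner k ms = ms.find? (fun m => keyIn k m) := by
      intro k; rfl
    cases h0 : ms.find? (fun m => keyIn "qwen" m) with
    | some x =>
      have hB : ms.foldl (altStep ["qwen", "vl", "llava", "vision"]) (none, 4) = (some x, 0) := by
        apply fold_find _ 0 ms none 4 x (by omega) (by intro m _; omega)
        rw [find?_congr_mem _ _ ms (fun m _ => rank_eq0 m)]
        exact h0
      simp [pyPickOuter, hfind, h0, hB]
    | none =>
      have h0' : ∀ m ∈ ms, keyIn "qwen" m = false := by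
        intro m hm; simpa using List.find?_eq_none.mp h0 m hm
      cases h1 : ms.find? (fun m => keyIn "vl" m) with
      | some x =>
        have hB : ms.foldl (altStep ["qwen", "vl", "llava", "vision"]) (none, 4) = (some x, 1) := by
          apply fold_find _ 1 ms none 4 x (by omega)
            (fun m hm => rank_ge1 m (h0' m hm))
          rw [find?_congr_mem _ _ ms (fun m hm => rank_eq1 m (h0' m hm))]
          exact h1
        simp [pyPickOuter, hfind, h0, h1, hB]
      | none =>
        have h1' : ∀ m ∈ ms, keyIn "vl" m = false := by
          intro m hm; simpa using List.find?_eq_none.mp h1 m hm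
        cases h2 : ms.find? (fun m => keyIn "llava" m) with
        | some x =>
          have hB : ms.foldl (altStep ["qwen", "vl", "llava", "vision"]) (none, 4) = (some x, 2) := by
            apply fold_find _ 2 ms none 4 x (by omega)
              (fun m hm => rank_ge2 m (h0' m hm) (h1' m hm))
            rw [find?_congr_mem _ _ ms (fun m hm => rank_eq2 m (h0' m hm) (h1' m hm))]
            exact h2
          simp [pyPickOuter, hfind, h0, h1, h2, hB]
        | none =>
          have h2' : ∀ m ∈ ms, keyIn "llava" m = false := by
            intro m hm; simpa using List.find?_eq_none.mp h2 m hm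
          cases h3 : ms.find? (fun m => keyIn "vision" m) with
          | some x =>
            have hB : ms.foldl (altStep ["qwen", "vl", "llava", "vision"]) (none, 4) = (some x, 3) := by
              apply fold_find _ 3 ms none 4 x (by omega)
                (fun m hm => rank_ge3 m (h0' m hm) (h1' m hm) (h2' m hm))
              rw [find?_congr_mem _ _ ms (fun m hm => rank_eq3 m (h0' m hm) (h1' m hm) (h2' m hm))]
              exact h3
            simp [pyPickOuter, hfind, h0, h1, h2, h3, hB]
          | none =>
            have h3' : ∀ m ∈ ms, keyIn "vision" m = false := by
              intro m hm; simpa using List.find?_eq_none.mp h3 m hm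
            have hB : ms.foldl (altStep ["qwen", "vl", "llava", "vision"]) (none, 4) = (none, 4) :=
              fold_stay _ ms none 4
                (fun m hm => rank_eq4 m (h0' m hm) (h1' m hm) (h2' m hm) (h3' m hm))
            simp [pyPickOuter, hfind, h0, h1, h2, h3, hB]
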